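-- pv_equiv track=rewrite | github.com/dPhoeniixx/dJEB_mcp_server | dJEB_mcp_server.py | _apply_grep_filter
-- ===== SOURCE A (Python) =====
-- def _apply_grep_filter(content, grep_pattern, context_lines=3):
--     if not grep_pattern:
--         return content
--
--     lines = content.split('\n')
--     matching_ranges = set()
--
--     for i, line in enumerate(lines):
--         if grep_pattern in line:
--             start = max(0, i - context_lines)
--             end = min(len(lines), i + context_lines + 1)
--             for j in range(start, end):
--                 matching_ranges.add(j)
--
--     if not matching_ranges:
--         return "No matches found for pattern: '%s'" % grep_pattern
--
--     sorted_ranges = sorted(matching_ranges)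
--     result_lines = []
--     prev_line = -2
--
--     for line_num in sorted_ranges:
--         if line_num > prev_line + 1:
--             result_lines.append("---")
--
--         line_content = lines[line_num]
--         if grep_pattern in line_content:
--             result_lines.append("[%d]* %s" % (line_num + 1, line_content))
--         else:
--             result_lines.append("[%d]  %s" % (line_num + 1, line_content))
--         prev_line = line_num
--
--     header = "Found %d matching lines for pattern: '%s'\n\n" % (
--         sum(1 for l in lines if grep_pattern in l), grep_pattern
--     )
--     return header + '\n'.join(result_lines)
-- ===== SOURCE B (Python) =====
-- def _apply_grep_filter(content, grep_pattern, context_lines=3):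
--     if not grep_pattern:
--         return content
--
--     lines = content.split('\n')
--     matched = [grep_pattern in line for line in lines]
--
--     out = []
--     prev_included = False
--     for j in range(len(lines)):
--         lo = max(0, j - context_lines)
--         hi = min(len(lines) - 1, j + context_lines)
--         if any(matched[i] for i in range(lo, hi + 1)):
--             if not prev_included:
--                 out.append("---")
--             out.append("[%d]%s %s" % (j + 1, "*" if matched[j] else " ", lines[j]))
--             prev_included = True
--         else:
--             prev_included = False
--
--     if not out:
--         return "No matches found for pattern: '%s'" % grep_pattern
--
--     header = "Found %d matching lines for pattern: '%s'\n\n" % (sum(matched), grep_pattern)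
--     return header + '\n'.join(out)
-- ===== Notes on version B (the rewrite author's own statement) =====
-- stated objective: alternative
-- what changed: Replaces A's pipeline (build a set of context indices per match, sort it, then scan for gaps) by a single left-to-right pass over the lines that tests a sliding context window of precomputed match flags and emits the output lines and '---' separators on the fly; no set and no sort.
import Mathlib
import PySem

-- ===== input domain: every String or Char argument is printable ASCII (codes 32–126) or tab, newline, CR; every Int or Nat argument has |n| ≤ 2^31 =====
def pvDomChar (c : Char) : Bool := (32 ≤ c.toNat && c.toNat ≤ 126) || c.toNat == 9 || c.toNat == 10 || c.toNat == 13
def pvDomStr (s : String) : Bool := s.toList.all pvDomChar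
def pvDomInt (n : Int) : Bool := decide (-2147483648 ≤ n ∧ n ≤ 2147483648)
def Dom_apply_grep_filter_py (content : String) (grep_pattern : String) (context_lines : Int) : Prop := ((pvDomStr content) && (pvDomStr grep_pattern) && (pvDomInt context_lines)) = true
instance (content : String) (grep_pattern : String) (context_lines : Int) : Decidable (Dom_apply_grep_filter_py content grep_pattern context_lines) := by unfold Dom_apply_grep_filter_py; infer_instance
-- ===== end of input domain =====

-- B is an alternative single-pass formulation of A's grep filter: one sweep over the lines with a
-- sliding window over precomputed match flags, instead of A's index-set + sort + gap-scan.

-- ===== PORT A =====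
-- body of A's set-building loop (one enumerated line p; start/end computed inside the match branch, as in A)
def pvA_step (grep_pattern : String) (n : Int) (context_lines : Int)
    (s : PySem.Set Int) (p : Int × String) : PySem.Set Int :=
  if PySem.Str.isIn grep_pattern p.2 then
    let start := max 0 (p.1 - context_lines)
    let stop := min n (p.1 + context_lines + 1)
    (PySem.List.pyRange start stop).foldl PySem.Set.add s
  else s

-- body of A's output loop; state = (result_lines, prev_line)
def pvA_emit (grep_pattern : String) (lines : List String)
    (st : List String × Int) (line_num : Int) : List String × Int :=
  let r1 := if line_num > st.2 + 1 then st.1 ++ ["---"] else st.1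
  let line_content := PySem.List.pyGetD lines line_num ""
  let r2 := if PySem.Str.isIn grep_pattern line_content then
      r1 ++ ["[" ++ PySem.Int.toStr (line_num + 1) ++ "]* " ++ line_content]
    else
      r1 ++ ["[" ++ PySem.Int.toStr (line_num + 1) ++ "]  " ++ line_content]
  (r2, line_num)

def apply_grep_filter_py (content : String) (grep_pattern : String) (context_lines : Int) : String :=
  if grep_pattern = "" then content
  else
    let lines := (PySem.Str.split? content "\n").getD []
    let matching_ranges : PySem.Set Int :=
      (PySem.List.enumerate lines).foldl
        (pvA_step grep_pattern (lines.length : Int) context_lines) PySem.Set.empty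
    if matching_ranges = [] then
      "No matches found for pattern: '" ++ grep_pattern ++ "'"
    else
      let sorted_ranges := PySem.List.sorted matching_ranges (fun x => x)
      let res := sorted_ranges.foldl (pvA_emit grep_pattern lines) ([], -2)
      let header := "Found " ++
        PySem.Int.toStr ((lines.map (fun l => if PySem.Str.isIn grep_pattern l then (1 : Int) else 0)).sum) ++
        " matching lines for pattern: '" ++ grep_pattern ++ "'\n\n"
      header ++ PySem.Str.join "\n" res.1

-- ===== PORT B =====
-- does any line within `context_lines` of line j match?  (any(matched[i] for i in range(lo, hi+1)))
def pvB_near (matched : List Bool) (n : Int) (context_lines : Int) (j : Int) : Bool :=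
  let lo := max 0 (j - context_lines)
  let hi := min (n - 1) (j + context_lines)
  (PySem.List.pyRange lo (hi + 1)).any (fun i => PySem.List.pyGetD matched i false)

-- body of B's single output loop; state = (out, prev_included)
def pvB_step (_grep_pattern : String) (lines : List String) (matched : List Bool) (context_lines : Int)
    (st : List String × Bool) (j : Int) : List String × Bool :=
  if pvB_near matched (lines.length : Int) context_lines j then
    let o := if !st.2 then st.1 ++ ["---"] else st.1
    (o ++ ["[" ++ PySem.Int.toStr (j + 1) ++ "]" ++
           (if PySem.List.pyGetD matched j false then "*" else " ") ++ " " ++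
           PySem.List.pyGetD lines j ""], true)
  else (st.1, false)

def apply_grep_filter_py_alt (content : String) (grep_pattern : String) (context_lines : Int) : String :=
  if grep_pattern = "" then content
  else
    let lines := (PySem.Str.split? content "\n").getD []
    let matched := lines.map (fun line => PySem.Str.isIn grep_pattern line)
    let st := (PySem.List.pyRange 0 (lines.length : Int)).foldl
      (pvB_step grep_pattern lines matched context_lines) ([], false)
    if st.1 = [] then "No matches found for pattern: '" ++ grep_pattern ++ "'"
    else
      let header := "Found " ++ PySem.Int.toStr ((matched.count true : Nat) : Int) ++
        " matching lines for pattern: '" ++ grep_pattern ++ "'\n\n"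
      header ++ PySem.Str.join "\n" st.1

-- ===== PRECONDITION & SPEC =====
def Spec_apply_grep_filter_py (content : String) (grep_pattern : String) (context_lines : Int) (out : String) : Prop := out = apply_grep_filter_py_alt content grep_pattern context_lines
instance (content : String) (grep_pattern : String) (context_lines : Int) (out : String) : Decidable (Spec_apply_grep_filter_py content grep_pattern context_lines out) := by unfold Spec_apply_grep_filter_py; infer_instance

-- ===== CLAIM (what is proved, stated in full; the proofs are below) =====
def Claim_equal_apply_grep_filter_py : Prop := ∀ (content : String) (grep_pattern : String) (context_lines : Int), Dom_apply_grep_filter_py content grep_pattern context_lines → Spec_apply_grep_filter_py content grep_pattern context_lines (apply_grep_filter_py content grep_pattern context_lines)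

-- ===== LEMMAS AND PROOFS =====

theorem pvA_fold_mem (pat : String) (n c : Int) (ps : List (Int × String))
    (s : PySem.Set Int) (x : Int) :
    x ∈ ps.foldl (pvA_step pat n c) s ↔
      x ∈ s ∨ ∃ p ∈ ps, PySem.Str.isIn pat p.2 = true ∧
        max 0 (p.1 - c) ≤ x ∧ x < min n (p.1 + c + 1) := by
  induction ps generalizing s with
  | nil => simp
  | cons p ps ih =>
    rw [List.foldl_cons, ih]
    have hstep : pvA_step pat n c s p =
        if PySem.Str.isIn pat p.2 then PySem.Set.update s (PySem.List.pyRange (max 0 (p.1 - c)) (min n (p.1 + c + 1))) else s := rfl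
    rw [hstep]
    by_cases h : PySem.Str.isIn pat p.2
    · simp only [if_pos h, PySem.Set.mem_update, PySem.List.mem_pyRange_one, List.mem_cons]
      constructor
      · rintro (((hx | hx) | ⟨q, hq, hq2, hq3⟩))
        · exact Or.inl hx
        · exact Or.inr ⟨p, Or.inl rfl, h, hx⟩
        · exact Or.inr ⟨q, Or.inr hq, hq2, hq3⟩
      · rintro (hx | ⟨q, (rfl | hq), hq2, hq3⟩)
        · exact Or.inl (Or.inl hx)
        · exact Or.inl (Or.inr hq3)
        · exact Or.inr ⟨q, hq, hq2, hq3⟩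
    · simp only [if_neg h, List.mem_cons]
      constructor
      · rintro (hx | ⟨q, hq, hq2, hq3⟩)
        · exact Or.inl hx
        · exact Or.inr ⟨q, Or.inr hq, hq2, hq3⟩
      · rintro (hx | ⟨q, (rfl | hq), hq2, hq3⟩)
        · exact Or.inl hx
        · exact absurd hq2 h
        · exact Or.inr ⟨q, hq, hq2, hq3⟩

theorem pvA_fold_nodup (pat : String) (n c : Int) (ps : List (Int × String))
    (s : PySem.Set Int) (hs : s.Nodup) :
    (ps.foldl (pvA_step pat n c) s).Nodup := by
  induction ps generalizing s with
  | nil => exact hs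
  | cons p ps ih =>
    rw [List.foldl_cons]
    apply ih
    unfold pvA_step
    split
    · exact PySem.Set.nodup_update _ _ hs
    · exact hs

theorem pv_count_eq (pat : String) (lines : List String) :
    ((lines.map (fun l => if PySem.Str.isIn pat l then (1 : Int) else 0)).sum) =
      (((lines.map (fun line => PySem.Str.isIn pat line)).count true : Nat) : Int) := by
  rw [PySem.List.sum_map_ite_one_zero]
  congr 1
  rw [List.count_eq_countP, List.countP_map]
  apply List.countP_congr
  intro l _
  simp [Function.comp]

theorem pvB_near_iff (matched : List Bool) (c x : Int) (hx0 : 0 ≤ x)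
    (hxn : x < (matched.length : Int)) :
    pvB_near matched (matched.length : Int) c x = true ↔
      ∃ (k : Nat) (h : k < matched.length), matched[k] = true ∧
        (k : Int) - c ≤ x ∧ x ≤ (k : Int) + c := by
  unfold pvB_near
  simp only [List.any_eq_true, PySem.List.mem_pyRange_one]
  constructor
  · rintro ⟨i, ⟨hi1, hi2⟩, hget⟩
    have h0 : 0 ≤ i := by omega
    have h1 : i < (matched.length : Int) := by omega
    rw [PySem.List.pyGetD_eq_getElem matched false h0 h1] at hget
    refine ⟨i.toNat, by omega, hget, by omega, by omega⟩
  · rintro ⟨k, hk, hget, hk1, hk2⟩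
    refine ⟨(k : Int), ⟨by omega, by omega⟩, ?_⟩
    rw [PySem.List.pyGetD_eq_getElem matched false (by omega) (by exact_mod_cast hk)]
    simpa using hget

theorem pvA_fold_len (pat : String) (lines : List String) (L : List Int)
    (acc : List String) (prev : Int) :
    acc.length + L.length ≤ ((L.foldl (pvA_emit pat lines) (acc, prev)).1).length := by
  induction L generalizing acc prev with
  | nil => simp
  | cons x L ih =>
    rcases hE : pvA_emit pat lines (acc, prev) x with ⟨r, q⟩
    have h := ih r q
    have hlen : acc.length + 1 ≤ r.length := by
      have hr : r = (pvA_emit pat lines (acc, prev) x).1 := by rw [hE]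
      rw [hr]; unfold pvA_emit; dsimp only
      split <;> split <;> simp
    rw [List.foldl_cons, hE]
    simp only [List.length_cons]
    omega

theorem pvRange_pairwise (a b : Int) : (PySem.List.pyRange a b).Pairwise (· < ·) := by
  by_cases h : a < b
  · rw [PySem.List.pyRange_one_cons h]
    refine List.Pairwise.cons ?_ (pvRange_pairwise (a + 1) b)
    intro x hx
    have := PySem.List.mem_pyRange_one.mp hx
    omega
  · have he : PySem.List.pyRange a b = [] := by
      apply List.eq_nil_iff_forall_not_mem.mpr
      intro x hx
      have := PySem.List.mem_pyRange_one.mp hx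
      omega
    rw [he]; exact List.Pairwise.nil
termination_by (b - a).toNat
decreasing_by omega

theorem pv_sorted_eq_filter (pat : String) (c : Int) (lines : List String) :
    PySem.List.sorted
        ((PySem.List.enumerate lines).foldl
          (pvA_step pat (lines.length : Int) c) PySem.Set.empty) (fun x => x) =
      (PySem.List.pyRange 0 (lines.length : Int)).filter
        (pvB_near (lines.map (fun line => PySem.Str.isIn pat line)) (lines.length : Int) c) := by
  have hml : (lines.map (fun line => PySem.Str.isIn pat line)).length = lines.length := by simp
  have hpf : ((PySem.List.pyRange 0 (lines.length : Int)).filter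
      (pvB_near (lines.map (fun line => PySem.Str.isIn pat line)) (lines.length : Int) c)).Pairwise (· < ·) :=
    (pvRange_pairwise 0 (lines.length : Int)).filter _
  apply PySem.List.sorted_eq_of_perm_of_pairwise_lt
  · -- Perm
    rw [show (PySem.Set.empty : PySem.Set Int) = [] from rfl]
    rw [List.perm_ext_iff_of_nodup (hpf.imp ne_of_lt)
        (pvA_fold_nodup pat (lines.length : Int) c _ _ List.nodup_nil)]
    intro x
    rw [List.mem_filter, pvA_fold_mem]
    constructor
    · rintro ⟨hxr, hnear⟩
      have hxb := PySem.List.mem_pyRange_one.mp hxr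
      rw [← hml] at hnear ⊢
      obtain ⟨k, hk, hmk, hk1, hk2⟩ := (pvB_near_iff _ c x hxb.1 (by omega)).mp hnear
      rw [List.getElem_map] at hmk
      refine Or.inr ⟨((k : Int), lines[k]'(by simpa using hk)), ?_, hmk, by omega, ?_⟩
      · rw [PySem.List.mem_enumerate_iff]
        exact ⟨k, by simpa using hk, by simp⟩
      · simp at hk ⊢; omega
    · rintro (hx | ⟨p, hp, hmp, h1, h2⟩)
      · simp at hx
      · rw [PySem.List.mem_enumerate_iff] at hp
        obtain ⟨k, hk, rfl⟩ := hp
        simp only [zero_add] at hmp h1 h2 ⊢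
        have hx0 : 0 ≤ x := by omega
        have hxn : x < (lines.length : Int) := by omega
        refine ⟨PySem.List.mem_pyRange_one.mpr ⟨hx0, hxn⟩, ?_⟩
        rw [← hml] at hxn ⊢
        apply (pvB_near_iff _ c x hx0 hxn).mpr
        refine ⟨k, by simpa using hk, ?_, by omega, by omega⟩
        rw [List.getElem_map]
        exact hmp
  · exact hpf

theorem pv_fold_equiv (pat : String) (c : Int) (lines : List String)
    (matched : List Bool) (hm : matched = lines.map (fun line => PySem.Str.isIn pat line))
    (a : Int) (ha : 0 ≤ a) (acc : List String) (prev : Int) (pI : Bool)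
    (hprev : prev < a) (hpI : pI = true ↔ prev = a - 1) :
    (((PySem.List.pyRange a (lines.length : Int)).filter
        (pvB_near matched (lines.length : Int) c)).foldl (pvA_emit pat lines) (acc, prev)).1 =
      ((PySem.List.pyRange a (lines.length : Int)).foldl
        (pvB_step pat lines matched c) (acc, pI)).1 := by
  subst hm
  by_cases hab : a < (lines.length : Int)
  · rw [PySem.List.pyRange_one_cons hab]
    have hget : PySem.List.pyGetD (lines.map (fun line => PySem.Str.isIn pat line)) a false =
        PySem.Str.isIn pat (PySem.List.pyGetD lines a "") := by
      rw [PySem.List.pyGetD_eq_getElem _ false ha (by simpa using hab),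
          PySem.List.pyGetD_eq_getElem lines "" ha hab, List.getElem_map]
    by_cases hnear : pvB_near (lines.map (fun line => PySem.Str.isIn pat line))
        (lines.length : Int) c a = true
    · rw [List.filter_cons_of_pos hnear, List.foldl_cons, List.foldl_cons]
      have hsep : (if a > prev + 1 then acc ++ ["---"] else acc) =
          (if !pI then acc ++ ["---"] else acc) := by
        by_cases hb : pI = true
        · have hpe : prev = a - 1 := hpI.mp hb
          rw [hb, if_neg (by omega)]; simp
        · have hb' : pI = false := by simpa using hb
          have hne : prev ≠ a - 1 := fun hh => hb (hpI.mpr hh)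
          rw [hb', if_pos (by omega)]; simp
      set lc := PySem.List.pyGetD lines a "" with hlc
      set entry := "[" ++ PySem.Int.toStr (a + 1) ++ "]" ++
           (if PySem.Str.isIn pat lc then "*" else " ") ++ " " ++ lc with hentry
      set newacc := (if !pI then acc ++ ["---"] else acc) ++ [entry] with hnew
      have hstr1 : "[" ++ PySem.Int.toStr (a + 1) ++ "]* " ++ lc =
          "[" ++ PySem.Int.toStr (a + 1) ++ "]" ++ "*" ++ " " ++ lc := by
        apply String.toList_inj.mp; simp [String.toList_append]
      have hstr2 : "[" ++ PySem.Int.toStr (a + 1) ++ "]  " ++ lc =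
          "[" ++ PySem.Int.toStr (a + 1) ++ "]" ++ " " ++ " " ++ lc := by
        apply String.toList_inj.mp; simp [String.toList_append]
      have hB : pvB_step pat lines (lines.map (fun line => PySem.Str.isIn pat line)) c (acc, pI) a
          = (newacc, true) := by
        unfold pvB_step
        rw [if_pos hnear]
        dsimp only
        rw [hget, ← hlc, hnew, hentry]
      have hA : pvA_emit pat lines (acc, prev) a = (newacc, a) := by
        unfold pvA_emit
        dsimp only
        rw [← hlc, hsep, hnew, hentry]
        by_cases hmb : PySem.Str.isIn pat lc = true
        · rw [if_pos hmb, if_pos hmb, hstr1]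
        · rw [if_neg hmb, if_neg hmb, hstr2]
      rw [hA, hB]
      exact pv_fold_equiv pat c lines _ rfl (a + 1) (by omega) newacc a true
        (by omega) ⟨(fun _ => by omega), (fun _ => rfl)⟩
    · rw [List.filter_cons_of_neg (by simpa using hnear), List.foldl_cons]
      have hstep : pvB_step pat lines (lines.map (fun line => PySem.Str.isIn pat line)) c (acc, pI) a
          = (acc, false) := by
        unfold pvB_step; rw [if_neg hnear]
      rw [hstep]
      exact pv_fold_equiv pat c lines _ rfl (a + 1) (by omega) acc prev false
        (by omega) ⟨(fun h => by cases h), (fun h => absurd h (by omega))⟩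
  · have he : PySem.List.pyRange a (lines.length : Int) = [] := by
      apply List.eq_nil_iff_forall_not_mem.mpr
      intro x hx
      have := PySem.List.mem_pyRange_one.mp hx
      omega
    rw [he]; rfl
termination_by ((lines.length : Int) - a).toNat
decreasing_by all_goals omega

-- ===== VERDICT (by name: the statement is the Claim_ definition above) =====
theorem apply_grep_filter_py_spec : Claim_equal_apply_grep_filter_py := by
  unfold Claim_equal_apply_grep_filter_py
  intro content pat c _
  unfold Spec_apply_grep_filter_py
  by_cases hp : pat = ""
  · simp only [apply_grep_filter_py, apply_grep_filter_py_alt, if_pos hp]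
  · simp only [apply_grep_filter_py, apply_grep_filter_py_alt, if_neg hp]
    set lines := (PySem.Str.split? content "\n").getD [] with hlines
    have hsorted := pv_sorted_eq_filter pat c lines
    have hfold := pv_fold_equiv pat c lines _ rfl 0 le_rfl [] (-2) false (by omega)
      ⟨(fun h => by cases h), (fun h => absurd h (by omega))⟩
    rw [hsorted, hfold, pv_count_eq pat lines]
    have hc1 : (List.foldl (pvA_step pat (lines.length : Int) c) PySem.Set.empty
        (PySem.List.enumerate lines) = []) ↔
        ((PySem.List.pyRange 0 (lines.length : Int)).foldl
          (pvB_step pat lines (lines.map (fun line => PySem.Str.isIn pat line)) c)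
          ([], false)).1 = [] := by
      rw [← PySem.List.sorted_eq_nil_iff _ (fun x : Int => x) false, hsorted, ← hfold]
      generalize ((PySem.List.pyRange 0 (lines.length : Int)).filter
        (pvB_near (lines.map (fun line => PySem.Str.isIn pat line)) (lines.length : Int) c)) = L
      constructor
      · intro h; rw [h]; rfl
      · intro h
        have hlen := pvA_fold_len pat lines L [] (-2)
        rw [h] at hlen
        simp at hlen
        exact hlen
    by_cases hnil : List.foldl (pvA_step pat (lines.length : Int) c) PySem.Set.empty
        (PySem.List.enumerate lines) = []
    · rw [if_pos hnil, if_pos (hc1.mp hnil)]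
    · rw [if_neg hnil, if_neg (fun h => hnil (hc1.mpr h))]
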